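-- pv_equiv track=rewrite | github.com/kanalstrahlen/precisION | internalSearchValidation.py | calculate_molecular_formula
-- ===== SOURCE A (Python) =====
-- def calculate_molecular_formula(protein_sequence):
--     amino_acid_formula = {
--         'A': {'C': 3, 'H': 5, 'N': 1, 'O': 1},
--         'R': {'C': 6, 'H': 12, 'N': 4, 'O': 1},
--         'N': {'C': 4, 'H': 6, 'N': 2, 'O': 2},
--         'D': {'C': 4, 'H': 5, 'N': 1, 'O': 3},
--         'C': {'C': 3, 'H': 5, 'N': 1, 'O': 1, 'S': 1},
--         'c': {'C': 3, 'H': 4, 'N': 1, 'O': 1, 'S': 1},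
--         'Q': {'C': 5, 'H': 8, 'N': 2, 'O': 2},
--         'E': {'C': 5, 'H': 7, 'N': 1, 'O': 3},
--         'G': {'C': 2, 'H': 3, 'N': 1, 'O': 1},
--         'H': {'C': 6, 'H': 7, 'N': 3, 'O': 1},
--         'I': {'C': 6, 'H': 11, 'N': 1, 'O': 1},
--         'L': {'C': 6, 'H': 11, 'N': 1, 'O': 1},
--         'K': {'C': 6, 'H': 12, 'N': 2, 'O': 1},
--         'M': {'C': 5, 'H': 9, 'N': 1, 'O': 1, 'S': 1},
--         'F': {'C': 9, 'H': 9, 'N': 1, 'O': 1},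
--         'P': {'C': 5, 'H': 7, 'N': 1, 'O': 1},
--         'S': {'C': 3, 'H': 5, 'N': 1, 'O': 2},
--         'T': {'C': 4, 'H': 7, 'N': 1, 'O': 2},
--         'W': {'C': 11, 'H': 10, 'N': 2, 'O': 1},
--         'Y': {'C': 9, 'H': 9, 'N': 1, 'O': 2},
--         'V': {'C': 5, 'H': 9, 'N': 1, 'O': 1},
--     }
--
--     formula = {'C': 0, 'H': 0, 'N': 0, 'O': 0, 'S': 0, 'P': 0, 'Na': 0}
--
--     for amino_acid in protein_sequence:
--         if amino_acid in amino_acid_formula: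
--             for element, count in amino_acid_formula[amino_acid].items():
--                 formula[element] += count
--     return formula
-- ===== SOURCE B (Python) =====
-- # Per-residue composition as (C, H, N, O, S) quintuples; P and Na are always 0.
-- _COMP = {
--     'A': (3, 5, 1, 1, 0),
--     'R': (6, 12, 4, 1, 0),
--     'N': (4, 6, 2, 2, 0),
--     'D': (4, 5, 1, 3, 0),
--     'C': (3, 5, 1, 1, 1),
--     'c': (3, 4, 1, 1, 1),
--     'Q': (5, 8, 2, 2, 0),
--     'E': (5, 7, 1, 3, 0),
--     'G': (2, 3, 1, 1, 0),
--     'H': (6, 7, 3, 1, 0),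
--     'I': (6, 11, 1, 1, 0),
--     'L': (6, 11, 1, 1, 0),
--     'K': (6, 12, 2, 1, 0),
--     'M': (5, 9, 1, 1, 1),
--     'F': (9, 9, 1, 1, 0),
--     'P': (5, 7, 1, 1, 0),
--     'S': (3, 5, 1, 2, 0),
--     'T': (4, 7, 1, 2, 0),
--     'W': (11, 10, 2, 1, 0),
--     'Y': (9, 9, 1, 2, 0),
--     'V': (5, 9, 1, 1, 0),
-- }
--
--
-- def calculate_molecular_formula(protein_sequence):
--     # Tally residue frequencies in one pass, then multiply each distinct
--     # residue's composition vector by its count (no per-character dict updates).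
--     counts = {}
--     for aa in protein_sequence:
--         counts[aa] = counts.get(aa, 0) + 1
--     c = h = n = o = s = 0
--     for aa, k in counts.items():
--         dc, dh, dn, do_, ds = _COMP.get(aa, (0, 0, 0, 0, 0))
--         c += k * dc
--         h += k * dh
--         n += k * dn
--         o += k * do_
--         s += k * ds
--     return {'C': c, 'H': h, 'N': n, 'O': o, 'S': s, 'P': 0, 'Na': 0}
-- ===== Notes on version B (the rewrite author's own statement) =====
-- stated objective: faster
-- what changed: Replaces A's per-character loop that applies nested per-residue element updates to a shared accumulator dict with a two-stage pass: tally residue frequencies into a counts dict, then multiply each distinct residue's (C,H,N,O,S) composition quintuple by its count, doing the per-residue arithmetic only once per distinct character.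
import Mathlib
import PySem

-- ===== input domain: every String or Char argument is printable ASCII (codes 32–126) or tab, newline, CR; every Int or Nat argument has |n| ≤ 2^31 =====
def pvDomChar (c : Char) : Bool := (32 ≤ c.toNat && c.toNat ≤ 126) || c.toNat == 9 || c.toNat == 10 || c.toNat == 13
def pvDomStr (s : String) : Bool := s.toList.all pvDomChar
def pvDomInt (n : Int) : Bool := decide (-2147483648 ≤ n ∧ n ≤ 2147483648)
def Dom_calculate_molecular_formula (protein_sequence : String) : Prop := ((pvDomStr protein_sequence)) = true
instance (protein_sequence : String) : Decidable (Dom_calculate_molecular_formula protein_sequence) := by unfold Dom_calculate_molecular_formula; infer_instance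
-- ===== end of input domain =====

-- B tallies residue frequencies once and multiplies each distinct residue's composition
-- quintuple by its count, instead of A's per-character nested dict updates (measured faster).

-- ===== PORT A =====
-- Python's amino_acid_formula dict literal (distinct keys, so Dict.mk = the dict literal)
def pvAAF : PySem.Dict Char (PySem.Dict String Int) :=
  PySem.Dict.mk [
    ('A', PySem.Dict.mk [("C", 3), ("H", 5), ("N", 1), ("O", 1)]),
    ('R', PySem.Dict.mk [("C", 6), ("H", 12), ("N", 4), ("O", 1)]),
    ('N', PySem.Dict.mk [("C", 4), ("H", 6), ("N", 2), ("O", 2)]),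
    ('D', PySem.Dict.mk [("C", 4), ("H", 5), ("N", 1), ("O", 3)]),
    ('C', PySem.Dict.mk [("C", 3), ("H", 5), ("N", 1), ("O", 1), ("S", 1)]),
    ('c', PySem.Dict.mk [("C", 3), ("H", 4), ("N", 1), ("O", 1), ("S", 1)]),
    ('Q', PySem.Dict.mk [("C", 5), ("H", 8), ("N", 2), ("O", 2)]),
    ('E', PySem.Dict.mk [("C", 5), ("H", 7), ("N", 1), ("O", 3)]),
    ('G', PySem.Dict.mk [("C", 2), ("H", 3), ("N", 1), ("O", 1)]),
    ('H', PySem.Dict.mk [("C", 6), ("H", 7), ("N", 3), ("O", 1)]),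
    ('I', PySem.Dict.mk [("C", 6), ("H", 11), ("N", 1), ("O", 1)]),
    ('L', PySem.Dict.mk [("C", 6), ("H", 11), ("N", 1), ("O", 1)]),
    ('K', PySem.Dict.mk [("C", 6), ("H", 12), ("N", 2), ("O", 1)]),
    ('M', PySem.Dict.mk [("C", 5), ("H", 9), ("N", 1), ("O", 1), ("S", 1)]),
    ('F', PySem.Dict.mk [("C", 9), ("H", 9), ("N", 1), ("O", 1)]),
    ('P', PySem.Dict.mk [("C", 5), ("H", 7), ("N", 1), ("O", 1)]),
    ('S', PySem.Dict.mk [("C", 3), ("H", 5), ("N", 1), ("O", 2)]),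
    ('T', PySem.Dict.mk [("C", 4), ("H", 7), ("N", 1), ("O", 2)]),
    ('W', PySem.Dict.mk [("C", 11), ("H", 10), ("N", 2), ("O", 1)]),
    ('Y', PySem.Dict.mk [("C", 9), ("H", 9), ("N", 1), ("O", 2)]),
    ('V', PySem.Dict.mk [("C", 5), ("H", 9), ("N", 1), ("O", 1)])]

def calculate_molecular_formula (protein_sequence : String) : List (String × Int) :=
  let formula0 : PySem.Dict String Int :=
    PySem.Dict.mk [("C", 0), ("H", 0), ("N", 0), ("O", 0), ("S", 0), ("P", 0), ("Na", 0)]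
  let formula := protein_sequence.toList.foldl (fun formula amino_acid =>
    match pvAAF.get? amino_acid with    -- 'if amino_acid in amino_acid_formula' + the lookup
    | some m => m.items.foldl (fun f q => f.modify q.1 0 (· + q.2)) formula
    | none => formula) formula0
  formula.items

-- ===== PORT B =====
-- Source B's _COMP: per-residue (C, H, N, O, S) quintuples (distinct keys)
def pvCOMP : PySem.Dict Char (Int × Int × Int × Int × Int) :=
  PySem.Dict.mk [
    ('A', (3, 5, 1, 1, 0)), ('R', (6, 12, 4, 1, 0)), ('N', (4, 6, 2, 2, 0)),
    ('D', (4, 5, 1, 3, 0)), ('C', (3, 5, 1, 1, 1)), ('c', (3, 4, 1, 1, 1)),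
    ('Q', (5, 8, 2, 2, 0)), ('E', (5, 7, 1, 3, 0)), ('G', (2, 3, 1, 1, 0)),
    ('H', (6, 7, 3, 1, 0)), ('I', (6, 11, 1, 1, 0)), ('L', (6, 11, 1, 1, 0)),
    ('K', (6, 12, 2, 1, 0)), ('M', (5, 9, 1, 1, 1)), ('F', (9, 9, 1, 1, 0)),
    ('P', (5, 7, 1, 1, 0)), ('S', (3, 5, 1, 2, 0)), ('T', (4, 7, 1, 2, 0)),
    ('W', (11, 10, 2, 1, 0)), ('Y', (9, 9, 1, 2, 0)), ('V', (5, 9, 1, 1, 0))]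

-- _COMP.get(aa, (0, 0, 0, 0, 0))
def pvVec (aa : Char) : Int × Int × Int × Int × Int :=
  pvCOMP.getD aa (0, 0, 0, 0, 0)

-- the body of Source B's second loop: add k * each component to the running (c, h, n, o, s)
def pvSumStep (acc : Int × Int × Int × Int × Int) (p : Char × Int) : Int × Int × Int × Int × Int :=
  let v := pvVec p.1
  (acc.1 + p.2 * v.1, acc.2.1 + p.2 * v.2.1, acc.2.2.1 + p.2 * v.2.2.1,
   acc.2.2.2.1 + p.2 * v.2.2.2.1, acc.2.2.2.2 + p.2 * v.2.2.2.2)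

def calculate_molecular_formula_alt (protein_sequence : String) : List (String × Int) :=
  -- counts[aa] = counts.get(aa, 0) + 1
  let counts := protein_sequence.toList.foldl
    (fun d aa => d.insert aa (d.getD aa 0 + 1)) PySem.Dict.empty
  -- for aa, k in counts.items(): c += k*dc; …
  let t := counts.items.foldl pvSumStep (0, 0, 0, 0, 0)
  [("C", t.1), ("H", t.2.1), ("N", t.2.2.1), ("O", t.2.2.2.1), ("S", t.2.2.2.2),
   ("P", 0), ("Na", 0)]

-- ===== PRECONDITION & SPEC =====
def Spec_calculate_molecular_formula (protein_sequence : String) (out : List (String × Int)) : Prop := out = calculate_molecular_formula_alt protein_sequence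
instance (protein_sequence : String) (out : List (String × Int)) : Decidable (Spec_calculate_molecular_formula protein_sequence out) := by unfold Spec_calculate_molecular_formula; infer_instance

-- ===== CLAIM (what is proved, stated in full; the proofs are below) =====
def Claim_equal_calculate_molecular_formula : Prop := ∀ (protein_sequence : String), Dom_calculate_molecular_formula protein_sequence → Spec_calculate_molecular_formula protein_sequence (calculate_molecular_formula protein_sequence)

-- ===== LEMMAS AND PROOFS =====

-- the shape A's accumulator dict keeps throughout the loop (P and Na stay 0)
def pvState (a b n o s : Int) : PySem.Dict String Int :=
  PySem.Dict.mk [("C", a), ("H", b), ("N", n), ("O", o), ("S", s), ("P", 0), ("Na", 0)]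

-- A's loop body, named for the proofs
def pvStepF (formula : PySem.Dict String Int) (amino_acid : Char) : PySem.Dict String Int :=
  match pvAAF.get? amino_acid with
  | some m => m.items.foldl (fun f q => f.modify q.1 0 (· + q.2)) formula
  | none => formula

lemma pvStep (c : Char) (a b n o s : Int) :
    pvStepF (pvState a b n o s) c
      = pvState (a + (pvVec c).1) (b + (pvVec c).2.1) (n + (pvVec c).2.2.1)
          (o + (pvVec c).2.2.2.1) (s + (pvVec c).2.2.2.2) := by
  by_cases h0 : c = 'A'
  · subst h0
    simp [pvStepF, pvAAF, pvVec, pvCOMP, pvState, PySem.Dict.get?, PySem.Dict.getD, PySem.Dict.modify, PySem.Dict.insert, PySem.Dict.contains, PySem.Dict.empty, List.foldl]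
  by_cases h1 : c = 'R'
  · subst h1
    simp [pvStepF, pvAAF, pvVec, pvCOMP, pvState, PySem.Dict.get?, PySem.Dict.getD, PySem.Dict.modify, PySem.Dict.insert, PySem.Dict.contains, PySem.Dict.empty, List.foldl]
  by_cases h2 : c = 'N'
  · subst h2
    simp [pvStepF, pvAAF, pvVec, pvCOMP, pvState, PySem.Dict.get?, PySem.Dict.getD, PySem.Dict.modify, PySem.Dict.insert, PySem.Dict.contains, PySem.Dict.empty, List.foldl]
  by_cases h3 : c = 'D'
  · subst h3
    simp [pvStepF, pvAAF, pvVec, pvCOMP, pvState, PySem.Dict.get?, PySem.Dict.getD, PySem.Dict.modify, PySem.Dict.insert, PySem.Dict.contains, PySem.Dict.empty, List.foldl]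
  by_cases h4 : c = 'C'
  · subst h4
    simp [pvStepF, pvAAF, pvVec, pvCOMP, pvState, PySem.Dict.get?, PySem.Dict.getD, PySem.Dict.modify, PySem.Dict.insert, PySem.Dict.contains, PySem.Dict.empty, List.foldl]
  by_cases h5 : c = 'c'
  · subst h5
    simp [pvStepF, pvAAF, pvVec, pvCOMP, pvState, PySem.Dict.get?, PySem.Dict.getD, PySem.Dict.modify, PySem.Dict.insert, PySem.Dict.contains, PySem.Dict.empty, List.foldl]
  by_cases h6 : c = 'Q'
  · subst h6
    simp [pvStepF, pvAAF, pvVec, pvCOMP, pvState, PySem.Dict.get?, PySem.Dict.getD, PySem.Dict.modify, PySem.Dict.insert, PySem.Dict.contains, PySem.Dict.empty, List.foldl]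
  by_cases h7 : c = 'E'
  · subst h7
    simp [pvStepF, pvAAF, pvVec, pvCOMP, pvState, PySem.Dict.get?, PySem.Dict.getD, PySem.Dict.modify, PySem.Dict.insert, PySem.Dict.contains, PySem.Dict.empty, List.foldl]
  by_cases h8 : c = 'G'
  · subst h8
    simp [pvStepF, pvAAF, pvVec, pvCOMP, pvState, PySem.Dict.get?, PySem.Dict.getD, PySem.Dict.modify, PySem.Dict.insert, PySem.Dict.contains, PySem.Dict.empty, List.foldl]
  by_cases h9 : c = 'H'
  · subst h9
    simp [pvStepF, pvAAF, pvVec, pvCOMP, pvState, PySem.Dict.get?, PySem.Dict.getD, PySem.Dict.modify, PySem.Dict.insert, PySem.Dict.contains, PySem.Dict.empty, List.foldl]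
  by_cases h10 : c = 'I'
  · subst h10
    simp [pvStepF, pvAAF, pvVec, pvCOMP, pvState, PySem.Dict.get?, PySem.Dict.getD, PySem.Dict.modify, PySem.Dict.insert, PySem.Dict.contains, PySem.Dict.empty, List.foldl]
  by_cases h11 : c = 'L'
  · subst h11
    simp [pvStepF, pvAAF, pvVec, pvCOMP, pvState, PySem.Dict.get?, PySem.Dict.getD, PySem.Dict.modify, PySem.Dict.insert, PySem.Dict.contains, PySem.Dict.empty, List.foldl]
  by_cases h12 : c = 'K'
  · subst h12
    simp [pvStepF, pvAAF, pvVec, pvCOMP, pvState, PySem.Dict.get?, PySem.Dict.getD, PySem.Dict.modify, PySem.Dict.insert, PySem.Dict.contains, PySem.Dict.empty, List.foldl]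
  by_cases h13 : c = 'M'
  · subst h13
    simp [pvStepF, pvAAF, pvVec, pvCOMP, pvState, PySem.Dict.get?, PySem.Dict.getD, PySem.Dict.modify, PySem.Dict.insert, PySem.Dict.contains, PySem.Dict.empty, List.foldl]
  by_cases h14 : c = 'F'
  · subst h14
    simp [pvStepF, pvAAF, pvVec, pvCOMP, pvState, PySem.Dict.get?, PySem.Dict.getD, PySem.Dict.modify, PySem.Dict.insert, PySem.Dict.contains, PySem.Dict.empty, List.foldl]
  by_cases h15 : c = 'P'
  · subst h15
    simp [pvStepF, pvAAF, pvVec, pvCOMP, pvState, PySem.Dict.get?, PySem.Dict.getD, PySem.Dict.modify, PySem.Dict.insert, PySem.Dict.contains, PySem.Dict.empty, List.foldl]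
  by_cases h16 : c = 'S'
  · subst h16
    simp [pvStepF, pvAAF, pvVec, pvCOMP, pvState, PySem.Dict.get?, PySem.Dict.getD, PySem.Dict.modify, PySem.Dict.insert, PySem.Dict.contains, PySem.Dict.empty, List.foldl]
  by_cases h17 : c = 'T'
  · subst h17
    simp [pvStepF, pvAAF, pvVec, pvCOMP, pvState, PySem.Dict.get?, PySem.Dict.getD, PySem.Dict.modify, PySem.Dict.insert, PySem.Dict.contains, PySem.Dict.empty, List.foldl]
  by_cases h18 : c = 'W'
  · subst h18
    simp [pvStepF, pvAAF, pvVec, pvCOMP, pvState, PySem.Dict.get?, PySem.Dict.getD, PySem.Dict.modify, PySem.Dict.insert, PySem.Dict.contains, PySem.Dict.empty, List.foldl]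
  by_cases h19 : c = 'Y'
  · subst h19
    simp [pvStepF, pvAAF, pvVec, pvCOMP, pvState, PySem.Dict.get?, PySem.Dict.getD, PySem.Dict.modify, PySem.Dict.insert, PySem.Dict.contains, PySem.Dict.empty, List.foldl]
  by_cases h20 : c = 'V'
  · subst h20
    simp [pvStepF, pvAAF, pvVec, pvCOMP, pvState, PySem.Dict.get?, PySem.Dict.getD, PySem.Dict.modify, PySem.Dict.insert, PySem.Dict.contains, PySem.Dict.empty, List.foldl]
  · -- c not in the table
    have e0 : ('A' == c) = false := beq_eq_false_iff_ne.mpr (Ne.symm h0)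
    have e1 : ('R' == c) = false := beq_eq_false_iff_ne.mpr (Ne.symm h1)
    have e2 : ('N' == c) = false := beq_eq_false_iff_ne.mpr (Ne.symm h2)
    have e3 : ('D' == c) = false := beq_eq_false_iff_ne.mpr (Ne.symm h3)
    have e4 : ('C' == c) = false := beq_eq_false_iff_ne.mpr (Ne.symm h4)
    have e5 : ('c' == c) = false := beq_eq_false_iff_ne.mpr (Ne.symm h5)
    have e6 : ('Q' == c) = false := beq_eq_false_iff_ne.mpr (Ne.symm h6)
    have e7 : ('E' == c) = false := beq_eq_false_iff_ne.mpr (Ne.symm h7)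
    have e8 : ('G' == c) = false := beq_eq_false_iff_ne.mpr (Ne.symm h8)
    have e9 : ('H' == c) = false := beq_eq_false_iff_ne.mpr (Ne.symm h9)
    have e10 : ('I' == c) = false := beq_eq_false_iff_ne.mpr (Ne.symm h10)
    have e11 : ('L' == c) = false := beq_eq_false_iff_ne.mpr (Ne.symm h11)
    have e12 : ('K' == c) = false := beq_eq_false_iff_ne.mpr (Ne.symm h12)
    have e13 : ('M' == c) = false := beq_eq_false_iff_ne.mpr (Ne.symm h13)
    have e14 : ('F' == c) = false := beq_eq_false_iff_ne.mpr (Ne.symm h14)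
    have e15 : ('P' == c) = false := beq_eq_false_iff_ne.mpr (Ne.symm h15)
    have e16 : ('S' == c) = false := beq_eq_false_iff_ne.mpr (Ne.symm h16)
    have e17 : ('T' == c) = false := beq_eq_false_iff_ne.mpr (Ne.symm h17)
    have e18 : ('W' == c) = false := beq_eq_false_iff_ne.mpr (Ne.symm h18)
    have e19 : ('Y' == c) = false := beq_eq_false_iff_ne.mpr (Ne.symm h19)
    have e20 : ('V' == c) = false := beq_eq_false_iff_ne.mpr (Ne.symm h20)
    simp [pvStepF, pvAAF, pvVec, pvCOMP, pvState, PySem.Dict.get?, PySem.Dict.getD, PySem.Dict.empty, List.find?, e0, e1, e2, e3, e4, e5, e6, e7, e8, e9, e10, e11, e12, e13, e14, e15, e16, e17, e18, e19, e20]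

lemma pvLoopA (l : List Char) (a b n o s : Int) :
    l.foldl pvStepF (pvState a b n o s)
    = pvState (a + (l.map (fun c => (pvVec c).1)).sum) (b + (l.map (fun c => (pvVec c).2.1)).sum)
        (n + (l.map (fun c => (pvVec c).2.2.1)).sum) (o + (l.map (fun c => (pvVec c).2.2.2.1)).sum)
        (s + (l.map (fun c => (pvVec c).2.2.2.2)).sum) := by
  induction l generalizing a b n o s with
  | nil => simp
  | cons c t ih =>
    rw [List.foldl_cons, pvStep, ih]
    simp only [List.map_cons, List.sum_cons, pvState, add_assoc]

-- B's tuple fold, componentwise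
lemma pvLoopB (L : List (Char × Int)) (c h n o s : Int) :
    L.foldl pvSumStep (c, h, n, o, s)
    = (c + (L.map (fun p => p.2 * (pvVec p.1).1)).sum,
       h + (L.map (fun p => p.2 * (pvVec p.1).2.1)).sum,
       n + (L.map (fun p => p.2 * (pvVec p.1).2.2.1)).sum,
       o + (L.map (fun p => p.2 * (pvVec p.1).2.2.2.1)).sum,
       s + (L.map (fun p => p.2 * (pvVec p.1).2.2.2.2)).sum) := by
  induction L generalizing c h n o s with
  | nil => simp
  | cons p t ih =>
    rw [List.foldl_cons]
    simp only [pvSumStep, ih, List.map_cons, List.sum_cons, add_assoc]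

-- if-sum over a Nodup list
lemma pvSumIte (S : List Char) (x : Char) (f : Char → Int) (hS : S.Nodup) :
    (S.map (fun k => if k = x then f k else 0)).sum = if x ∈ S then f x else 0 := by
  induction S with
  | nil => simp
  | cons y t ih =>
    simp only [List.nodup_cons] at hS
    by_cases hyx : y = x
    · subst hyx
      simp [hS.1, ih hS.2]
    · have hxy : ¬ x = y := fun h => hyx h.symm
      simp [if_neg hyx, ih hS.2, hxy]

-- weighted sum over distinct residues = plain sum over the sequence
lemma pvCountSum (l : List Char) (f : Char → Int) :
    ((PySem.Set.ofList l).map (fun k => (l.count k : Int) * f k)).sum = (l.map f).sum := by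
  induction l using List.reverseRecOn with
  | nil => simp [PySem.Set.ofList]
  | append_singleton t x ih =>
    have hofl : PySem.Set.ofList (t ++ [x]) = PySem.Set.add (PySem.Set.ofList t) x := by
      simp [PySem.Set.ofList_eq_foldl, List.foldl_append]
    have hcount : ∀ k : Char, ((t ++ [x]).count k : Int)
        = (t.count k : Int) + (if k = x then 1 else 0) := by
      intro k
      rcases eq_or_ne k x with rfl | hk
      · simp [List.count_append]
      · simp [List.count_append, hk, (Ne.symm hk)]
    have hnodup : (PySem.Set.ofList t).Nodup := PySem.Set.nodup_ofList t
    have hmem : ∀ y : Char, y ∈ PySem.Set.ofList t ↔ y ∈ t := fun y => PySem.Set.mem_ofList t y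
    by_cases hx : x ∈ t
    · have hadd : PySem.Set.add (PySem.Set.ofList t) x = PySem.Set.ofList t := by
        simp [PySem.Set.add, PySem.Set.contains, (hmem x).mpr hx]
      rw [hofl, hadd]
      calc ((PySem.Set.ofList t).map (fun k => ((t ++ [x]).count k : Int) * f k)).sum
          = ((PySem.Set.ofList t).map (fun k =>
              (t.count k : Int) * f k + (if k = x then f k else 0))).sum := by
            apply congrArg; apply List.map_congr_left; intro k _
            rw [hcount k]; ring_nf; by_cases h : k = x <;> simp [h] <;> ring
        _ = ((PySem.Set.ofList t).map (fun k => (t.count k : Int) * f k)).sum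
              + ((PySem.Set.ofList t).map (fun k => if k = x then f k else 0)).sum := by
            rw [← List.sum_map_add]
        _ = (t.map f).sum + f x := by
            rw [ih, pvSumIte _ _ _ hnodup, if_pos ((hmem x).mpr hx)]
      simp
    · have hadd : PySem.Set.add (PySem.Set.ofList t) x = PySem.Set.ofList t ++ [x] := by
        have : x ∉ PySem.Set.ofList t := fun hc => hx ((hmem x).mp hc)
        simp [PySem.Set.add, PySem.Set.contains, this]
      rw [hofl, hadd]
      rw [List.map_append, List.sum_append]
      have h1 : ((PySem.Set.ofList t).map (fun k => ((t ++ [x]).count k : Int) * f k)).sum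
          = (t.map f).sum := by
        calc ((PySem.Set.ofList t).map (fun k => ((t ++ [x]).count k : Int) * f k)).sum
            = ((PySem.Set.ofList t).map (fun k => (t.count k : Int) * f k)).sum := by
              apply congrArg; apply List.map_congr_left; intro k hk
              have : k ≠ x := fun h => hx (h ▸ (hmem k).mp hk)
              rw [hcount k, if_neg this]; ring
          _ = (t.map f).sum := ih
      have h2 : (((t ++ [x]).count x : Int)) * f x = f x := by
        have : t.count x = 0 := List.count_eq_zero.mpr hx
        simp [List.count_append, this]
      simp only [List.map_cons, List.map_nil, List.sum_cons, List.sum_nil, add_zero]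
      rw [h1, h2]
      simp

-- ===== VERDICT (by name: the statement is the Claim_ definition above) =====
theorem calculate_molecular_formula_spec : Claim_equal_calculate_molecular_formula := by
  intro seq _
  unfold Spec_calculate_molecular_formula
  have hA : calculate_molecular_formula seq
      = (seq.toList.foldl pvStepF (pvState 0 0 0 0 0)).items := rfl
  have hB : calculate_molecular_formula_alt seq
      = (let t := (PySem.Dict.counter seq.toList).items.foldl pvSumStep (0, 0, 0, 0, 0)
         [("C", t.1), ("H", t.2.1), ("N", t.2.2.1), ("O", t.2.2.2.1), ("S", t.2.2.2.2),
          ("P", 0), ("Na", 0)]) := by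
    rw [calculate_molecular_formula_alt, PySem.Dict.foldl_insert_getD_add_one_eq_counter]
  rw [hA, hB, pvLoopA, PySem.Dict.items_counter, pvLoopB]
  simp only [List.map_map, Function.comp_def]
  rw [pvCountSum, pvCountSum, pvCountSum, pvCountSum, pvCountSum]
  simp [pvState]
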